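-- pv_equiv track=rewrite | github.com/derekwisong/pyagent | pyagent/cli.py | _agents_tokens
-- ===== SOURCE A (Python) =====
-- def _agents_tokens(agents: dict) -> tuple[int, int, int, int]:
--     """Sum input/output/cache-write/cache-read tokens across all
--     tracked agents."""
--     in_tot = sum(a.get("tokens", {}).get("input", 0) for a in agents.values())
--     out_tot = sum(a.get("tokens", {}).get("output", 0) for a in agents.values())
--     cw_tot = sum(
--         a.get("tokens", {}).get("cache_creation", 0) for a in agents.values()
--     )
--     cr_tot = sum(
--         a.get("tokens", {}).get("cache_read", 0) for a in agents.values()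
--     )
--     return in_tot, out_tot, cw_tot, cr_tot
-- ===== SOURCE B (Python) =====
-- def _agents_tokens(agents: dict) -> tuple[int, int, int, int]:
--     """Sum input/output/cache-write/cache-read tokens across all tracked
--     agents by scattering each tokens dict's items into a totals table."""
--     totals = {"input": 0, "output": 0, "cache_creation": 0, "cache_read": 0}
--     for a in agents.values():
--         for k, v in a.get("tokens", {}).items():
--             if k in totals:
--                 totals[k] += v
--     return (totals["input"], totals["output"], totals["cache_creation"],
--             totals["cache_read"])
-- ===== Notes on version B (the rewrite author's own statement) =====
-- stated objective: alternative
-- what changed: Instead of A's four per-category sum-comprehensions each scanning agents.values() and doing a keyed lookup, B builds a category-keyed totals dict and scatters each agent's tokens items into it in one pass, reading the four entries out at the end.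
import Mathlib
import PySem

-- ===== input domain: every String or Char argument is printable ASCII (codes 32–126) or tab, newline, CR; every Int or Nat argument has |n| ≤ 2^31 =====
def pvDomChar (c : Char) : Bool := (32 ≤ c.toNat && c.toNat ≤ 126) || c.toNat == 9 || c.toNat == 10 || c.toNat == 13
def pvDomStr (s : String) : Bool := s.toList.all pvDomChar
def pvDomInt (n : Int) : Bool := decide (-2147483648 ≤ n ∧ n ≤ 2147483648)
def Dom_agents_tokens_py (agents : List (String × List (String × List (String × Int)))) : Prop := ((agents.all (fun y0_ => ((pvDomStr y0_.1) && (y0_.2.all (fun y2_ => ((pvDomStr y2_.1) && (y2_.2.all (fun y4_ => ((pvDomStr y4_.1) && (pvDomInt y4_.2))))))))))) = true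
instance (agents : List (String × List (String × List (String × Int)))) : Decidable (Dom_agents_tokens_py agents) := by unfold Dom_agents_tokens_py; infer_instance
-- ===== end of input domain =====

-- B scatters each agent's tokens items once into a category-keyed totals dict instead of A's four per-category sum scans (alternative decomposition, same cost class).


-- ===== PORT A =====
def agents_tokens_py (agents : List (String × List (String × List (String × Int)))) : Int × Int × Int × Int :=
  -- four generator-sums, each a full pass over agents.values()
  let in_tot := ((agents.map Prod.snd).map (fun a =>
      (PySem.Dict.mk ((PySem.Dict.mk a).getD "tokens" [])).getD "input" 0)).sum
  let out_tot := ((agents.map Prod.snd).map (fun a =>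
      (PySem.Dict.mk ((PySem.Dict.mk a).getD "tokens" [])).getD "output" 0)).sum
  let cw_tot := ((agents.map Prod.snd).map (fun a =>
      (PySem.Dict.mk ((PySem.Dict.mk a).getD "tokens" [])).getD "cache_creation" 0)).sum
  let cr_tot := ((agents.map Prod.snd).map (fun a =>
      (PySem.Dict.mk ((PySem.Dict.mk a).getD "tokens" [])).getD "cache_read" 0)).sum
  (in_tot, out_tot, cw_tot, cr_tot)

-- ===== PORT B =====
-- dict.items() under the assoc-list convention (lookup = first match): the pairs
-- of the represented dict are the FIRST occurrence of each key, in order.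
def pvItems (t : List (String × Int)) : List (String × Int) :=
  match t with
  | [] => []
  | kv :: rest => kv :: pvItems (rest.filter (fun p => !(p.1 == kv.1)))
termination_by t.length
decreasing_by
  simp only [List.length_cons, Nat.lt_succ_iff, List.length_unattach]
  exact le_trans (List.length_filter_le _ _) (le_of_eq List.length_attach)

-- for k, v in … .items(): if k in totals: totals[k] += v
def pvTokStep (d : PySem.Dict String Int) (kv : String × Int) : PySem.Dict String Int :=
  if d.contains kv.1 then d.modify kv.1 0 (· + kv.2) else d

-- body of the outer loop over agents.values()
def pvAgentStep (d : PySem.Dict String Int) (p : String × List (String × List (String × Int))) : PySem.Dict String Int :=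
  (pvItems ((PySem.Dict.mk p.2).getD "tokens" [])).foldl pvTokStep d

def agents_tokens_py_alt (agents : List (String × List (String × List (String × Int)))) : Int × Int × Int × Int :=
  let totals := agents.foldl pvAgentStep
      (PySem.Dict.mk [("input", 0), ("output", 0), ("cache_creation", 0), ("cache_read", 0)])
  (totals.getD "input" 0, totals.getD "output" 0,
   totals.getD "cache_creation" 0, totals.getD "cache_read" 0)

-- ===== PRECONDITION & SPEC =====
def Spec_agents_tokens_py (agents : List (String × List (String × List (String × Int)))) (out : Int × Int × Int × Int) : Prop := out = agents_tokens_py_alt agents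
instance (agents : List (String × List (String × List (String × Int)))) (out : Int × Int × Int × Int) : Decidable (Spec_agents_tokens_py agents out) := by unfold Spec_agents_tokens_py; infer_instance

-- ===== CLAIM (what is proved, stated in full; the proofs are below) =====
def Claim_equal_agents_tokens_py : Prop := ∀ (agents : List (String × List (String × List (String × Int)))), Dom_agents_tokens_py agents → Spec_agents_tokens_py agents (agents_tokens_py agents)

-- ===== LEMMAS AND PROOFS =====

theorem pvItems_nil : pvItems [] = [] := by
  rw [pvItems.eq_def]

theorem pvItems_cons (kv : String × Int) (rest : List (String × Int)) :
    pvItems (kv :: rest) = kv :: pvItems (rest.filter (fun p => !(p.1 == kv.1))) := by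
  rw [pvItems.eq_def]

-- the token loop does not change which keys totals contains
theorem pv_contains_tokStep (l : List (String × Int)) (d : PySem.Dict String Int) (x : String) :
    (l.foldl pvTokStep d).contains x = d.contains x := by
  induction l generalizing d with
  | nil => rfl
  | cons kv rest ih =>
      simp only [List.foldl_cons, ih, pvTokStep]
      split_ifs with h
      · by_cases hx : x = kv.1 <;> simp [PySem.Dict.contains_modify, hx, h]
      · rfl

-- a filtered-out key is absent from the dict
theorem pv_get?_filter_self (l : List (String × Int)) (k : String) :
    (PySem.Dict.mk (l.filter (fun p => !(p.1 == k)))).get? k = none := by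
  induction l with
  | nil => rfl
  | cons kv rest ih =>
      obtain ⟨k1, v1⟩ := kv
      by_cases h : k1 = k
      · simp only [List.filter_cons]
        rw [if_neg (by simp [h])]
        exact ih
      · simp only [List.filter_cons]
        rw [if_pos (by simp [h]), PySem.Dict.get?_mk_cons]
        simpa [h] using ih

-- filtering out key-k pairs does not change lookups at other keys
theorem pv_get?_filter_ne (l : List (String × Int)) (k c : String) (hck : c ≠ k) :
    (PySem.Dict.mk (l.filter (fun p => !(p.1 == k)))).get? c = (PySem.Dict.mk l).get? c := by
  induction l with
  | nil => rfl
  | cons kv rest ih =>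
      obtain ⟨k1, v1⟩ := kv
      by_cases h : k1 = k
      · simp only [List.filter_cons]
        rw [if_neg (by simp [h]), ih, PySem.Dict.get?_mk_cons]
        simp [h, Ne.symm hck]
      · simp only [List.filter_cons]
        rw [if_pos (by simp [h]), PySem.Dict.get?_mk_cons, PySem.Dict.get?_mk_cons]
        by_cases hc : k1 = c
        · simp [hc]
        · simp [hc, ih]

-- scattering one tokens dict into totals adds exactly its value at each contained key
theorem pv_inner (t : List (String × Int)) (d : PySem.Dict String Int) (c : String)
    (hc : d.contains c = true) :
    ((pvItems t).foldl pvTokStep d).getD c 0 = d.getD c 0 + (PySem.Dict.mk t).getD c 0 := by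
  induction ht : t.length using Nat.strong_induction_on generalizing t d with
  | _ n ih =>
  match t with
  | [] =>
      rw [pvItems_nil]
      simp [PySem.Dict.getD_eq_get?_getD, PySem.Dict.get?]
  | (k, v) :: rest =>
      have hlen : (rest.filter (fun p => !(p.1 == k))).length < n := by
        subst ht
        simpa using Nat.lt_succ_of_le (List.length_filter_le _ _)
      rw [pvItems_cons, List.foldl_cons]
      by_cases hck : c = k
      · subst hck
        have hk : pvTokStep d (c, v) = d.modify c 0 (· + v) := by
          simp [pvTokStep, hc]
        rw [hk, ih _ hlen _ _ (by simp [PySem.Dict.contains_modify, hc]) rfl]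
        rw [PySem.Dict.getD_of_get?_eq_none _ _ (pv_get?_filter_self rest c)]
        rw [PySem.Dict.getD_modify_self]
        have hv : (PySem.Dict.mk ((c, v) :: rest)).getD c 0 = v := by
          simp [PySem.Dict.getD_eq_get?_getD, PySem.Dict.get?_mk_cons]
        rw [hv]; ring
      · have h1 : (pvTokStep d (k, v)).getD c 0 = d.getD c 0 := by
          unfold pvTokStep
          split_ifs with h
          · exact PySem.Dict.getD_modify_of_ne _ _ _ hck
          · rfl
        have h2 : (pvTokStep d (k, v)).contains c = true := by
          unfold pvTokStep
          split_ifs with h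
          · simpa [PySem.Dict.contains_modify] using Or.inr hc
          · exact hc
        rw [ih _ hlen _ _ h2 rfl, h1]
        have hrest : (PySem.Dict.mk (rest.filter (fun p => !(p.1 == k)))).getD c 0
            = (PySem.Dict.mk ((k, v) :: rest)).getD c 0 := by
          rw [PySem.Dict.getD_eq_get?_getD, PySem.Dict.getD_eq_get?_getD,
            pv_get?_filter_ne rest k c hck, PySem.Dict.get?_mk_cons]
          rw [beq_eq_false_iff_ne.mpr (fun hh : k = c => hck hh.symm)]
          simp
        rw [hrest]

-- the outer loop accumulates A's per-category sum on top of the start dict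
theorem pv_outer (agents : List (String × List (String × List (String × Int))))
    (d : PySem.Dict String Int) (c : String) (hc : d.contains c = true) :
    (agents.foldl pvAgentStep d).getD c 0
      = d.getD c 0 + ((agents.map Prod.snd).map (fun a =>
          (PySem.Dict.mk ((PySem.Dict.mk a).getD "tokens" [])).getD c 0)).sum := by
  induction agents generalizing d with
  | nil => simp
  | cons p rest ih =>
      simp only [List.foldl_cons, List.map_cons, List.sum_cons]
      have hc' : (pvAgentStep d p).contains c = true := by
        unfold pvAgentStep
        rw [pv_contains_tokStep]
        exact hc
      rw [ih _ hc', pvAgentStep, pv_inner _ _ _ hc]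
      ring

-- ===== VERDICT (by name: the statement is the Claim_ definition above) =====
theorem agents_tokens_py_spec : Claim_equal_agents_tokens_py := by
  intro agents _
  unfold Spec_agents_tokens_py
  simp only [agents_tokens_py, agents_tokens_py_alt]
  rw [pv_outer agents _ "input" (by decide), pv_outer agents _ "output" (by decide),
    pv_outer agents _ "cache_creation" (by decide), pv_outer agents _ "cache_read" (by decide)]
  norm_num [PySem.Dict.getD_eq_get?_getD, PySem.Dict.get?_mk_cons]
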